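-- pv_equiv track=rewrite | github.com/Enzo-Laborde/AutoSeqTools | AStools.py | kernelIter
-- ===== SOURCE A (Python) =====
-- def kernelIter(C, u, i, k, SeqSize):
-- 	"""
-- 	Compute the k-kernel of the sequence u up to i-th iteration, and store subsequences of length SeqSize in the Kernel:
-- 		C: dict - take the previously computed Kernel and append it with new iteration
-- 		i: int - Iteration to compute (k**i)
-- 		k: int - k-Kernel
-- 		u: str/list - sequence we compute the Kernel
-- 		SeqSize: int - Size of subsequences in the Kernel (greater = more precise)
-- 	"""
--
-- 	# Each subsequences, one letter every k**i letters
-- 	for j in range(k ** i):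
-- 		l = 0
-- 		ch = ''  # The subsequences
--
-- 		# Build each subsequences
-- 		while (k ** i) * l + j < len(u) and len(ch) < SeqSize:
-- 			ch += u[(k ** i) * l + j]
-- 			l += 1
--
-- 		if ch not in C:
-- 			C[ch] = 1  # New subsequence
-- 		else:
-- 			C[ch] += 1  # Subsequence arleady exist
--
-- 	return C
-- ===== SOURCE B (Python) =====
-- def kernelIter(C, u, i, k, SeqSize):
--     stride = k ** i
--     if stride <= 0:
--         return C
--     limit = min(len(u), stride * SeqSize) if SeqSize > 0 else 0
--     nonempty = min(stride, limit)  # residues that receive at least one character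
--     buckets = [''] * nonempty
--     for idx in range(limit):
--         buckets[idx % stride] += u[idx]
--     for ch in buckets:
--         C[ch] = C.get(ch, 0) + 1
--     if nonempty < stride:  # the remaining stride - nonempty subsequences are all empty
--         C[''] = C.get('', 0) + (stride - nonempty)
--     return C
-- ===== Notes on version B (the rewrite author's own statement) =====
-- stated objective: alternative
-- what changed: Replaces the per-residue nested scan (outer loop over k**i residues, inner while rebuilding each subsequence with k**i recomputed at every step) by one linear distribution pass appending each of the first min(len(u), stride*SeqSize) characters into its residue bucket, tallying the nonempty buckets, and bulk-adding the count of residues whose subsequence is empty.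
import Mathlib
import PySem

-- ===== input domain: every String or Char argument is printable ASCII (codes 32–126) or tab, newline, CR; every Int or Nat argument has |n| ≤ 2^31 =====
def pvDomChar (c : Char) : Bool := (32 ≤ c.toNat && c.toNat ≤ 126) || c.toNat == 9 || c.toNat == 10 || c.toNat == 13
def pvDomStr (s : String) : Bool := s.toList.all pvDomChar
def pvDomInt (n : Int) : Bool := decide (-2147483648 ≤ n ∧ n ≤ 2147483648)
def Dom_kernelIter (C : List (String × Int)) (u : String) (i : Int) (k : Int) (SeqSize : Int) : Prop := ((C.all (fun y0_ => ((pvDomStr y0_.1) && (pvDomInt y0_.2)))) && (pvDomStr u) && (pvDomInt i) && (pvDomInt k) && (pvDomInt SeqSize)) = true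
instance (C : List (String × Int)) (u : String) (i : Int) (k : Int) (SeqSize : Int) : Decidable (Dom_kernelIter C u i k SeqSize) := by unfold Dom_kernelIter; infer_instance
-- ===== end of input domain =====

-- B replaces A's per-residue nested scan by one linear distribution pass into stride buckets
-- plus a tally (same cost, different decomposition). Both Pythons mutate C in place identically;
-- the equivalence proved is about the returned association list.


-- ===== PORT A =====
-- the inner 'while' loop: builds one subsequence; fuel = len(u) bounds the iterations
-- (each iteration reads a fresh, strictly larger index < len(u), so at most len(u) iterations happen)
def kernelIterBuild (s : List Char) (stride j SeqSize : Int) : Nat → Int → List Char → List Char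
  | 0, _, ch => ch
  | fuel + 1, l, ch =>
    if stride * l + j < (s.length : Int) ∧ (ch.length : Int) < SeqSize then
      match PySem.List.pyGet? s (stride * l + j) with
      | some c => kernelIterBuild s stride j SeqSize fuel (l + 1) (ch ++ [c])
      | none => ch
    else ch

def kernelIter (C : List (String × Int)) (u : String) (i : Int) (k : Int) (SeqSize : Int) : List (String × Int) :=
  let stride := k ^ i.toNat
  ((PySem.List.pyRange 0 stride 1).foldl (fun d j =>
      let ch := String.ofList (kernelIterBuild u.toList stride j SeqSize u.toList.length 0 [])
      if PySem.Dict.contains d ch = false then PySem.Dict.insert d ch 1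
      else PySem.Dict.insert d ch (PySem.Dict.getD d ch 0 + 1)) (PySem.Dict.mk C)).items

-- ===== PORT B =====
-- single distribution pass: buckets[idx % stride] += u[idx] for idx < limit;
-- only the min(stride, limit) residues that receive a character get a bucket
def kernelIterAltBuckets (s : List Char) (stride limit nonempty : Int) : List (List Char) :=
  (PySem.List.pyRange 0 limit 1).foldl (fun bs idx =>
    match PySem.List.pyGet? s idx with
    | some c => bs.set (PySem.Int.mod idx stride).toNat ((bs.getD (PySem.Int.mod idx stride).toNat []) ++ [c])
    | none => bs) (List.replicate nonempty.toNat [])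

def kernelIter_alt (C : List (String × Int)) (u : String) (i : Int) (k : Int) (SeqSize : Int) : List (String × Int) :=
  let stride := k ^ i.toNat
  if stride ≤ 0 then C
  else
    let limit : Int := if 0 < SeqSize then min (u.toList.length : Int) (stride * SeqSize) else 0
    let nonempty : Int := min stride limit
    let d := (kernelIterAltBuckets u.toList stride limit nonempty).foldl (fun d b =>
        PySem.Dict.insert d (String.ofList b) (PySem.Dict.getD d (String.ofList b) 0 + 1)) (PySem.Dict.mk C)
    (if nonempty < stride then
        PySem.Dict.insert d "" (PySem.Dict.getD d "" 0 + (stride - nonempty))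
      else d).items

-- ===== PRECONDITION & SPEC =====
-- Python raises for i < 0 (k ** i is a float, so range() / list repetition raise TypeError, or
-- ZeroDivisionError when k == 0); B raises there too. Pre_ also excludes C whose keys repeat:
-- no Python dict produces such an association list, and the ports' behaviour on that degenerate
-- encoding matches no Python run (a dict collapses the duplicates before either function starts).
def Pre_kernelIter (C : List (String × Int)) (u : String) (i : Int) (k : Int) (SeqSize : Int) : Prop :=
  0 ≤ i ∧ (C.map Prod.fst).Nodup
instance (C : List (String × Int)) (u : String) (i : Int) (k : Int) (SeqSize : Int) : Decidable (Pre_kernelIter C u i k SeqSize) := by unfold Pre_kernelIter; infer_instance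
def pvWitness_kernelIter : (List (String × Int)) × String × Int × Int × Int := ([("ab", 2)], "abcab", 1, 2, 2)

def Spec_kernelIter (C : List (String × Int)) (u : String) (i : Int) (k : Int) (SeqSize : Int) (out : List (String × Int)) : Prop := out = kernelIter_alt C u i k SeqSize
instance (C : List (String × Int)) (u : String) (i : Int) (k : Int) (SeqSize : Int) (out : List (String × Int)) : Decidable (Spec_kernelIter C u i k SeqSize out) := by unfold Spec_kernelIter; infer_instance

-- ===== CLAIM (what is proved, stated in full; the proofs are below) =====
def Claim_equal_kernelIter : Prop := ∀ (C : List (String × Int)) (u : String) (i : Int) (k : Int) (SeqSize : Int), Dom_kernelIter C u i k SeqSize → Pre_kernelIter C u i k SeqSize → Spec_kernelIter C u i k SeqSize (kernelIter C u i k SeqSize)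

-- ===== LEMMAS AND PROOFS =====

-- the common specification of bucket j: the characters of s at indices < L congruent to j mod n
def kiSpec (s : List Char) (n L j : Nat) : List Char :=
  ((List.range L).filter (fun idx => idx % n == j)).filterMap (fun idx => s[idx]?)

theorem kiSpec_zero (s : List Char) (n j : Nat) : kiSpec s n 0 j = [] := by
  simp [kiSpec]

theorem kiSpec_succ (s : List Char) (n L j : Nat) :
    kiSpec s n (L + 1) j =
      kiSpec s n L j ++ (if L % n = j then (s[L]?).toList else []) := by
  simp only [kiSpec, List.range_succ, List.filter_append, List.filterMap_append]
  split_ifs with h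
  · cases hv : s[L]? <;> simp [h, hv]
  · simp [h]

-- A's inner loop, still to run from counter l: indices ≥ n*l + j
def kiTail (s : List Char) (n L j l : Nat) : List Char :=
  ((List.range L).filter (fun idx => decide (idx % n = j ∧ n * l + j ≤ idx))).filterMap
    (fun idx => s[idx]?)

theorem kiTail_zero (s : List Char) (n L j : Nat) : kiTail s n L j 0 = kiSpec s n L j := by
  unfold kiTail kiSpec
  congr 1
  apply List.filter_congr
  intro idx _
  by_cases hc : idx % n = j
  · have := Nat.mod_le idx n
    simp [hc]; omega
  · simp [hc]

theorem kiTail_empty (s : List Char) (n L j l : Nat) (h : L ≤ n * l + j) :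
    kiTail s n L j l = [] := by
  unfold kiTail
  rw [List.filter_eq_nil_iff.mpr]
  · simp
  · intro idx hidx
    have := List.mem_range.mp hidx
    simp only [decide_eq_true_eq]
    omega

theorem kiTail_step (s : List Char) (n L j l : Nat) (hn : 0 < n) (hj : j < n)
    (hlt : n * l + j < L) :
    kiTail s n L j l = (s[n * l + j]?).toList ++ kiTail s n L j (l + 1) := by
  unfold kiTail
  have hsplit : List.range L
      = (List.range (n * l + j) ++ [n * l + j]) ++
        (List.range (L - (n * l + j + 1))).map (fun t => (n * l + j + 1) + t) := by
    rw [← List.range_succ, ← List.range_add]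
    congr 1
    omega
  rw [hsplit]
  simp only [List.filter_append, List.filterMap_append]
  have h1 : ∀ (m : Nat), l ≤ m → List.filter (fun idx => decide (idx % n = j ∧ n * m + j ≤ idx))
      (List.range (n * l + j)) = [] := by
    intro m hml
    rw [List.filter_eq_nil_iff]
    intro idx hidx
    have hidx' := List.mem_range.mp hidx
    have hmm : n * l ≤ n * m := Nat.mul_le_mul_left n hml
    simp only [decide_eq_true_eq]
    omega
  have hamod : (n * l + j) % n = j := by
    have h : n * l + j = j + l * n := by ring
    rw [h, Nat.add_mul_mod_self_right, Nat.mod_eq_of_lt hj]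
  have hpl : (decide ((n * l + j) % n = j ∧ n * l + j ≤ n * l + j)) = true := by
    simp [hamod]
  have hpl1 : (decide ((n * l + j) % n = j ∧ n * (l + 1) + j ≤ n * l + j)) = false := by
    have h : n * (l + 1) = n * l + n := by ring
    simp only [decide_eq_false_iff_not]
    omega
  have htail : List.filter (fun idx => decide (idx % n = j ∧ n * l + j ≤ idx))
        ((List.range (L - (n * l + j + 1))).map (fun t => (n * l + j + 1) + t))
      = List.filter (fun idx => decide (idx % n = j ∧ n * (l + 1) + j ≤ idx))
        ((List.range (L - (n * l + j + 1))).map (fun t => (n * l + j + 1) + t)) := by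
    apply List.filter_congr
    intro x hx
    obtain ⟨t, _, rfl⟩ := List.mem_map.mp hx
    by_cases hm : (n * l + j + 1 + t) % n = j
    · set x := n * l + j + 1 + t with hxdef
      have hdm := Nat.div_add_mod x n
      have hgt : n * l + j < x := by omega
      have hq : l < x / n := by
        by_contra hc
        push_neg at hc
        have : n * (x / n) ≤ n * l := Nat.mul_le_mul_left n hc
        omega
      have hq1 : n * (l + 1) ≤ n * (x / n) := Nat.mul_le_mul_left n hq
      have h2 : n * (l + 1) = n * l + n := by ring
      simp only [hm, true_and, decide_eq_decide]
      omega
    · simp [hm]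
  rw [h1 l le_rfl, h1 (l + 1) (by omega), htail]
  simp only [List.filter_singleton, hpl, hpl1, if_true, if_false, List.filterMap_nil,
    List.nil_append, List.append_nil, List.filterMap_cons]
  cases hsv : s[n * l + j]? <;> simp [hsv]

theorem kiBuild_inv (s : List Char) (n j : Nat) (SeqSize : Int) (hn : 0 < n) (hj : j < n) :
    ∀ (fuel l : Nat) (ch : List Char), s.length ≤ fuel + l → ch.length = l →
      kernelIterBuild s (n : Int) (j : Int) SeqSize fuel (l : Int) ch
        = ch ++ kiTail s n (min s.length (n * SeqSize.toNat)) j l := by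
  intro fuel
  induction fuel with
  | zero =>
    intro l ch hfl hch
    have hle : l ≤ n * l := Nat.le_mul_of_pos_left l hn
    rw [kiTail_empty s n _ j l (by omega)]
    simp [kernelIterBuild]
  | succ fuel ih =>
    intro l ch hfl hch
    rw [kernelIterBuild]
    by_cases hc : (n : Int) * (l : Int) + (j : Int) < (s.length : Int) ∧ ((ch.length : Nat) : Int) < SeqSize
    · rw [if_pos hc]
      obtain ⟨hc1, hc2⟩ := hc
      have hidx : n * l + j < s.length := by exact_mod_cast by push_cast at hc1 ⊢; omega
      have hlS : l < SeqSize.toNat := by omega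
      have hcast : (n : Int) * (l : Int) + (j : Int) = ((n * l + j : Nat) : Int) := by push_cast; ring
      rw [hcast, PySem.List.pyGet?_natCast, List.getElem?_eq_getElem hidx]
      have hrec := ih (l + 1) (ch ++ [s[n * l + j]]) (by omega) (by simp [hch])
      have hl1 : ((l : Int) + 1) = ((l + 1 : Nat) : Int) := by push_cast; ring
      change kernelIterBuild s (n : Int) (j : Int) SeqSize fuel ((l : Int) + 1) (ch ++ [s[n * l + j]]) = _
      rw [hl1, hrec]
      have hmul : n * (l + 1) ≤ n * SeqSize.toNat := Nat.mul_le_mul_left n (by omega)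
      have h2 : n * (l + 1) = n * l + n := by ring
      have hmul2 : n * l + j < n * (l + 1) := by omega
      have hlt : n * l + j < min s.length (n * SeqSize.toNat) := by omega
      rw [kiTail_step s n _ j l hn hj hlt, List.getElem?_eq_getElem hidx]
      simp
    · rw [if_neg hc]
      have hempty : min s.length (n * SeqSize.toNat) ≤ n * l + j := by
        rw [Classical.not_and_iff_not_or_not] at hc
        rcases hc with hc | hc
        · push_neg at hc
          have : (s.length : Int) ≤ (n : Int) * (l : Int) + (j : Int) := hc
          have : ((s.length : Nat) : Int) ≤ ((n * l + j : Nat) : Int) := by push_cast at this ⊢; omega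
          have := Int.ofNat_le.mp this
          omega
        · push_neg at hc
          have hSl : SeqSize.toNat ≤ l := by omega
          have : n * SeqSize.toNat ≤ n * l := Nat.mul_le_mul_left n hSl
          omega
      rw [kiTail_empty s n _ j l hempty]
      simp

theorem kernelIterBuild_eq (s : List Char) (n j : Nat) (SeqSize : Int)
    (hn : 0 < n) (hj : j < n) :
    kernelIterBuild s (n : Int) (j : Int) SeqSize s.length 0 []
      = kiSpec s n (min s.length (n * SeqSize.toNat)) j := by
  have := kiBuild_inv s n j SeqSize hn hj s.length 0 [] (by omega) rfl
  simpa [kiTail_zero] using this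

-- B's distribution fold over List.range m, in Nat form
-- a residue at or beyond L owns no index < L, so its bucket is empty
theorem kiSpec_high (s : List Char) (n L r : Nat) (h : L ≤ r) : kiSpec s n L r = [] := by
  unfold kiSpec
  rw [List.filter_eq_nil_iff.mpr]
  · simp
  · intro idx hidx
    have h1 := List.mem_range.mp hidx
    have h2 := Nat.mod_le idx n
    simp only [beq_iff_eq]
    omega

-- B's distribution fold over List.range m, in Nat form
theorem kiBuckets_nat (s : List Char) (n L : Nat) (hn : 0 < n) (hLs : L ≤ s.length) :
    ∀ (m : Nat), m ≤ L →
      (List.range m).foldl (fun bs idx =>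
          match s[idx]? with
          | some c => bs.set (idx % n) ((bs.getD (idx % n) []) ++ [c])
          | none => bs) (List.replicate (min n L) ([] : List Char))
        = (List.range (min n L)).map (kiSpec s n m) := by
  intro m
  induction m with
  | zero =>
    intro _
    have hz : (List.range (min n L)).map (kiSpec s n 0) = (List.range (min n L)).map (fun _ => []) :=
      List.map_congr_left (fun t _ => kiSpec_zero s n t)
    rw [List.range_zero, List.foldl_nil, hz, List.map_const']
    simp
  | succ m ih =>
    intro hm
    rw [List.range_succ, List.foldl_append, ih (by omega)]
    have hsm : s[m]? = some s[m] := List.getElem?_eq_getElem (by omega)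
    simp only [List.foldl_cons, List.foldl_nil, hsm]
    have hmod : m % n < min n L := by
      rcases Nat.lt_or_ge m n with h | h
      · rw [Nat.mod_eq_of_lt h]; omega
      · have := Nat.mod_lt m hn; omega
    rw [PySem.List.getD_map_range (kiSpec s n m) (min n L) (m % n) [] hmod]
    apply List.ext_getElem
    · simp
    · intro t h1 h2
      simp only [List.length_set, List.length_map, List.length_range] at h1 h2
      simp only [List.getElem_set, List.getElem_map, List.getElem_range]
      rw [kiSpec_succ, hsm]
      split_ifs with h
      · simp [h]
      · simp [h]

-- 'if ch not in C: C[ch] = 1 else: C[ch] += 1' is 'C[ch] = C.get(ch, 0) + 1'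
theorem tally_if (d : PySem.Dict String Int) (ch : String) :
    (if PySem.Dict.contains d ch = false then PySem.Dict.insert d ch 1
     else PySem.Dict.insert d ch (PySem.Dict.getD d ch 0 + 1))
    = PySem.Dict.insert d ch (PySem.Dict.getD d ch 0 + 1) := by
  by_cases h : PySem.Dict.contains d ch = false
  · rw [if_pos h, PySem.Dict.getD_of_not_contains d 0 h]
    norm_num
  · rw [if_neg h]

-- tallying the same key t > 0 times is one bulk increment
theorem tally_rep (x : String) : ∀ (t : Nat) (d : PySem.Dict String Int), 0 < t →
    (List.range t).foldl (fun d _ => PySem.Dict.insert d x (PySem.Dict.getD d x 0 + 1)) d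
      = PySem.Dict.insert d x (PySem.Dict.getD d x 0 + (t : Int)) := by
  intro t
  induction t with
  | zero => intro d h; omega
  | succ t ih =>
    intro d _
    rw [List.range_succ, List.foldl_append]
    by_cases ht : 0 < t
    · rw [ih d ht]
      simp only [List.foldl_cons, List.foldl_nil]
      rw [PySem.Dict.getD_insert_self, PySem.Dict.insert_insert_self]
      congr 1
      push_cast
      ring
    · have h0 : t = 0 := by omega
      subst h0
      simp only [List.range_zero, List.foldl_nil, List.foldl_cons, List.foldl_nil]
      norm_num

-- main equivalence, with stride generalized
theorem kernelIter_core (C : List (String × Int)) (s : List Char) (stride SeqSize : Int) :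
    ((PySem.List.pyRange 0 stride 1).foldl (fun d j =>
        let ch := String.ofList (kernelIterBuild s stride j SeqSize s.length 0 [])
        if PySem.Dict.contains d ch = false then PySem.Dict.insert d ch 1
        else PySem.Dict.insert d ch (PySem.Dict.getD d ch 0 + 1)) (PySem.Dict.mk C)).items
    = if stride ≤ 0 then C
      else
        (let limit : Int := if 0 < SeqSize then min ((s.length : Int)) (stride * SeqSize) else 0
         let d := (kernelIterAltBuckets s stride limit (min stride limit)).foldl (fun d b =>
             PySem.Dict.insert d (String.ofList b)
               (PySem.Dict.getD d (String.ofList b) 0 + 1)) (PySem.Dict.mk C)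
         (if min stride limit < stride then
             PySem.Dict.insert d "" (PySem.Dict.getD d "" 0 + (stride - min stride limit))
           else d).items) := by
  by_cases hneg : stride ≤ 0
  · rw [if_pos hneg, PySem.List.pyRange_one]
    have h0 : (stride - 0).toNat = 0 := by omega
    rw [h0]
    simp
  · rw [if_neg hneg]
    have hpos : 0 < stride := by omega
    set n := stride.toNat with hn
    have hcast : (n : Int) = stride := Int.toNat_of_nonneg (by omega)
    set L := min s.length (n * SeqSize.toNat) with hL
    have hlimit : (if 0 < SeqSize then min ((s.length : Int)) (stride * SeqSize) else 0)
        = (L : Int) := by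
      by_cases hS : 0 < SeqSize
      · rw [if_pos hS]
        have hSS : SeqSize = (SeqSize.toNat : Int) := by omega
        rw [hL, ← hcast, hSS]
        push_cast
        rfl
      · rw [if_neg hS]
        have h0 : SeqSize.toNat = 0 := by omega
        rw [hL, h0]
        simp
    simp only [hlimit]
    set B := min n L with hB
    have hBcast : min stride ((L : Nat) : Int) = ((B : Nat) : Int) := by
      rw [hB, ← hcast]
      push_cast
      rw [min_comm]
    have hbuckets : kernelIterAltBuckets s stride (L : Int) (min stride (L : Int))
        = (List.range B).map (kiSpec s n L) := by
      unfold kernelIterAltBuckets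
      rw [PySem.List.pyRange_zero_natCast, List.foldl_map]
      have hcongr : ∀ (bs : List (List Char)), ∀ x ∈ List.range L,
          (match PySem.List.pyGet? s ((x : Nat) : Int) with
            | some c => bs.set (PySem.Int.mod ((x : Nat) : Int) stride).toNat
                ((bs.getD (PySem.Int.mod ((x : Nat) : Int) stride).toNat []) ++ [c])
            | none => bs)
          = (match s[x]? with
            | some c => bs.set (x % n) ((bs.getD (x % n) []) ++ [c])
            | none => bs) := by
        intro bs x _
        simp only [PySem.List.pyGet?_natCast, ← hcast, PySem.Int.mod_natCast, Int.toNat_natCast]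
      rw [PySem.List.foldl_congr_mem _ _ _ _ hcongr, hBcast, Int.toNat_natCast, hB]
      exact kiBuckets_nat s n L (by omega) (by omega) L le_rfl
    rw [hbuckets, List.foldl_map]
    rw [← hcast, PySem.List.pyRange_zero_natCast, List.foldl_map]
    have hBn : B ≤ n := by omega
    have hsplit : List.range n = List.range B ++ (List.range (n - B)).map (fun t => B + t) := by
      rw [← List.range_add]
      congr 1
      omega
    rw [hsplit, List.foldl_append]
    have hhead : ∀ (d : PySem.Dict String Int), ∀ t ∈ List.range B,
        (let ch := String.ofList (kernelIterBuild s ((n : Nat) : Int) ((t : Nat) : Int) SeqSize s.length 0 [])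
         if PySem.Dict.contains d ch = false then PySem.Dict.insert d ch 1
         else PySem.Dict.insert d ch (PySem.Dict.getD d ch 0 + 1))
        = PySem.Dict.insert d (String.ofList (kiSpec s n L t))
            (PySem.Dict.getD d (String.ofList (kiSpec s n L t)) 0 + 1) := by
      intro d t ht
      have htn : t < n := by have := List.mem_range.mp ht; omega
      dsimp only
      rw [kernelIterBuild_eq s n t SeqSize (by omega) htn, tally_if]
    rw [PySem.List.foldl_congr_mem _ _ _ _ hhead]
    set d1 := (List.range B).foldl (fun d t =>
        PySem.Dict.insert d (String.ofList (kiSpec s n L t))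
          (PySem.Dict.getD d (String.ofList (kiSpec s n L t)) 0 + 1)) (PySem.Dict.mk C) with hd1
    rw [List.foldl_map]
    have htail : ∀ (d : PySem.Dict String Int), ∀ t ∈ List.range (n - B),
        (let ch := String.ofList (kernelIterBuild s ((n : Nat) : Int) (((B + t : Nat)) : Int) SeqSize s.length 0 [])
         if PySem.Dict.contains d ch = false then PySem.Dict.insert d ch 1
         else PySem.Dict.insert d ch (PySem.Dict.getD d ch 0 + 1))
        = PySem.Dict.insert d "" (PySem.Dict.getD d "" 0 + 1) := by
      intro d t ht
      have htn : B + t < n := by have := List.mem_range.mp ht; omega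
      have hLB : L ≤ B + t := by omega
      dsimp only
      rw [kernelIterBuild_eq s n (B + t) SeqSize (by omega) htn, tally_if,
        kiSpec_high s n L (B + t) hLB]
    rw [PySem.List.foldl_congr_mem _ _ _ _ htail]
    rw [← hcast] at hBcast
    by_cases hlt : B < n
    · have hcond : min ((n : Nat) : Int) ((L : Nat) : Int) < ((n : Nat) : Int) := by
        rw [hBcast]
        exact_mod_cast hlt
      rw [if_pos hcond, tally_rep "" (n - B) d1 (by omega)]
      congr 2
      rw [hBcast]
      push_cast
      omega
    · have hBn' : B = n := by omega
      have hcond : ¬ min ((n : Nat) : Int) ((L : Nat) : Int) < ((n : Nat) : Int) := by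
        rw [hBcast, hBn']
        omega
      rw [if_neg hcond, hBn']
      simp

theorem kernelIter_main (C : List (String × Int)) (u : String) (i k SeqSize : Int) :
    kernelIter C u i k SeqSize = kernelIter_alt C u i k SeqSize := by
  unfold kernelIter kernelIter_alt
  exact kernelIter_core C u.toList (k ^ i.toNat) SeqSize

-- ===== VERDICT (by name: the statement is the Claim_ definition above) =====
theorem kernelIter_spec : Claim_equal_kernelIter := by
  intro C u i k SeqSize _ _
  unfold Spec_kernelIter
  exact kernelIter_main C u i k SeqSize
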